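-- pv_equiv track=rewrite | github.com/NickPittas/Validator | nuke_validator.py | _is_colorspace_allowed
-- ===== SOURCE A (Python) =====
-- from typing import Dict, List, Optional, Tuple
--
-- def _is_colorspace_allowed(current_colorspace: str, allowed_colorspaces: List[str]) -> bool:
--     """
--     Intelligent colorspace matching that understands similar colorspace names
--
--     Args:
--         current_colorspace: The current colorspace string
--         allowed_colorspaces: List of allowed colorspace strings
--
--     Returns:
--         bool: True if current colorspace is considered allowed
--     """
--     # Exact match first
--     if current_colorspace in allowed_colorspaces:
--         return True
--
--     # Normalize strings for comparison (lowercase, remove spaces/dashes)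
--     def normalize_colorspace(cs):
--         return cs.lower().replace(' ', '').replace('-', '').replace('_', '')
--
--     current_norm = normalize_colorspace(current_colorspace)
--
--     # Define colorspace aliases and patterns with expanded mappings for Nuke's verbose names
--     colorspace_patterns = {
--         'acescg': ['acescg', 'aces', 'acesCg', 'aces-acescg', 'acesapplied', 'acescglin'],
--         'aces2065': ['aces2065', 'aces20651', 'aces-2065-1'],
--         'linear': ['linear', 'scenelinear', 'scene_linear', 'scenereferred', 'lin'],
--         'srgb': ['srgb', 'sRGB', 'inputsrgb', 'input-srgb', 'outputsrgb', 'output-srgb'],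
--         'rec709': ['rec709', 'rec.709', 'inputrec709', 'input-rec709', 'outputrec709', 'output-rec709', 'r709'],
--         'log': ['log', 'logc', 'alog', 'arri', 'log3g10'],
--         'p3': ['p3', 'p3d65', 'displayp3', 'dci-p3'],
--         'rec2020': ['rec2020', 'rec.2020', 'bt2020', 'bt.2020'],
--         'sgamut': ['sgamut', 'sgamut3', 'sgamut3cine', 'slog3']
--     }
--
--     # Map from Nuke's verbose colorspace names to their short codes
--     verbose_to_short = {
--         # ACEScg variants
--         'aces - acescg': 'acescglin',
--         'acescg': 'acescglin',
--         'scene_linear (aces - acescg)': 'acescglin',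
--         'compositing_linear (aces - acescg)': 'acescglin',
--         'rendering (aces - acescg)': 'acescglin',
--         'utility - linear - acescg': 'acescglin',
--
--         # ACES2065-1 variants
--         'aces - aces2065-1': 'aces2065',
--         'aces2065-1': 'aces2065',
--
--         # Other colorspaces
--         'input - arri - v3 logc (ei800) - alexa': 'logc',
--         'input - red - log3g10 - redwidegamutrgb': 'log3g10',
--         'input - sony - slog3 - sgamut3.cine': 'slog3',
--         'input - srgb': 'srgb',
--         'input - rec.709': 'rec709',
--         'output - srgb': 'srgb',
--         'output - rec.709': 'rec709',
--         'output - rec.2020': 'rec2020',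
--         'output - p3-dci': 'p3',
--         'utility - linear - srgb': 'linear',
--         'utility - raw': 'raw',
--         'utility - log': 'log'
--     }
--
--     # Check if the current colorspace is a verbose name with a known short code
--     current_norm_lower = current_colorspace.lower()
--     if current_norm_lower in verbose_to_short:
--         short_code = verbose_to_short[current_norm_lower]
--         # Check if any allowed colorspace matches this short code
--         for allowed in allowed_colorspaces:
--             allowed_norm = normalize_colorspace(allowed)
--             if short_code == allowed_norm or short_code in allowed_norm:
--                 return True
--
--     # Check if current colorspace matches any pattern group
--     for pattern_group, patterns in colorspace_patterns.items():
--         if any(pattern in current_norm for pattern in patterns):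
--             # Check if any allowed colorspace also matches this pattern group
--             for allowed in allowed_colorspaces:
--                 allowed_norm = normalize_colorspace(allowed)
--                 if any(pattern in allowed_norm for pattern in patterns):
--                     return True
--
--     # Check for partial matches with key terms
--     key_terms = ['acescg', 'aces2065', 'linear', 'srgb', 'rec709', 'log', 'p3', 'rec2020', 'sgamut']
--     current_terms = [term for term in key_terms if term in current_norm]
--
--     if current_terms:
--         for allowed in allowed_colorspaces:
--             allowed_norm = normalize_colorspace(allowed)
--             # If they share at least one key term, consider it a match
--             allowed_terms = [term for term in key_terms if term in allowed_norm]
--             if any(term in allowed_terms for term in current_terms):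
--                 return True
--
--     return False
-- ===== SOURCE B (Python) =====
-- from typing import List
--
-- # Flat inverted index: (pattern, tag) pairs. Tags are the pattern-group names.
-- # The key_terms phase of the original is redundant: every key term equals a
-- # group name and occurs in that group's own pattern list, so sharing a key
-- # term always implies sharing that pattern group.
-- _PATTERN_PAIRS = [
--     ('acescg', 'acescg'), ('aces', 'acescg'), ('acesCg', 'acescg'),
--     ('aces-acescg', 'acescg'), ('acesapplied', 'acescg'), ('acescglin', 'acescg'),
--     ('aces2065', 'aces2065'), ('aces20651', 'aces2065'), ('aces-2065-1', 'aces2065'),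
--     ('linear', 'linear'), ('scenelinear', 'linear'), ('scene_linear', 'linear'),
--     ('scenereferred', 'linear'), ('lin', 'linear'),
--     ('srgb', 'srgb'), ('sRGB', 'srgb'), ('inputsrgb', 'srgb'),
--     ('input-srgb', 'srgb'), ('outputsrgb', 'srgb'), ('output-srgb', 'srgb'),
--     ('rec709', 'rec709'), ('rec.709', 'rec709'), ('inputrec709', 'rec709'),
--     ('input-rec709', 'rec709'), ('outputrec709', 'rec709'),
--     ('output-rec709', 'rec709'), ('r709', 'rec709'),
--     ('log', 'log'), ('logc', 'log'), ('alog', 'log'), ('arri', 'log'), ('log3g10', 'log'),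
--     ('p3', 'p3'), ('p3d65', 'p3'), ('displayp3', 'p3'), ('dci-p3', 'p3'),
--     ('rec2020', 'rec2020'), ('rec.2020', 'rec2020'), ('bt2020', 'rec2020'), ('bt.2020', 'rec2020'),
--     ('sgamut', 'sgamut'), ('sgamut3', 'sgamut'), ('sgamut3cine', 'sgamut'), ('slog3', 'sgamut'),
-- ]
--
-- _VERBOSE_TO_SHORT = {
--     'aces - acescg': 'acescglin',
--     'acescg': 'acescglin',
--     'scene_linear (aces - acescg)': 'acescglin',
--     'compositing_linear (aces - acescg)': 'acescglin',
--     'rendering (aces - acescg)': 'acescglin',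
--     'utility - linear - acescg': 'acescglin',
--     'aces - aces2065-1': 'aces2065',
--     'aces2065-1': 'aces2065',
--     'input - arri - v3 logc (ei800) - alexa': 'logc',
--     'input - red - log3g10 - redwidegamutrgb': 'log3g10',
--     'input - sony - slog3 - sgamut3.cine': 'slog3',
--     'input - srgb': 'srgb',
--     'input - rec.709': 'rec709',
--     'output - srgb': 'srgb',
--     'output - rec.709': 'rec709',
--     'output - rec.2020': 'rec2020',
--     'output - p3-dci': 'p3',
--     'utility - linear - srgb': 'linear',
--     'utility - raw': 'raw',
--     'utility - log': 'log',
-- }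
--
--
-- def _normalize(cs: str) -> str:
--     return cs.lower().replace(' ', '').replace('-', '').replace('_', '')
--
--
-- def _tags(norm: str):
--     return {tag for pattern, tag in _PATTERN_PAIRS if pattern in norm}
--
--
-- def _is_colorspace_allowed(current_colorspace: str, allowed_colorspaces: List[str]) -> bool:
--     cur_norm = _normalize(current_colorspace)
--     cur_tags = _tags(cur_norm)
--     short_code = _VERBOSE_TO_SHORT.get(current_colorspace.lower())
--
--     for allowed in allowed_colorspaces:
--         if allowed == current_colorspace:
--             return True
--         allowed_norm = _normalize(allowed)
--         if short_code is not None and short_code in allowed_norm: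
--             return True
--         if cur_tags & _tags(allowed_norm):
--             return True
--     return False
-- ===== Notes on version B (the rewrite author's own statement) =====
-- stated objective: simpler
-- what changed: A's four sequential phases (exact scan, verbose scan of allowed, one rescan of allowed per matching pattern group, then a key-term rescan) are replaced by a flat (pattern, tag) inverted index: the current colorspace's tag set is computed once and a single pass over the allowed list checks exact match, short-code substring, or tag-set intersection; the key-term phase is dropped as provably redundant (every key term equals a group name and occurs in that group's own pattern list).
import Mathlib
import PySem

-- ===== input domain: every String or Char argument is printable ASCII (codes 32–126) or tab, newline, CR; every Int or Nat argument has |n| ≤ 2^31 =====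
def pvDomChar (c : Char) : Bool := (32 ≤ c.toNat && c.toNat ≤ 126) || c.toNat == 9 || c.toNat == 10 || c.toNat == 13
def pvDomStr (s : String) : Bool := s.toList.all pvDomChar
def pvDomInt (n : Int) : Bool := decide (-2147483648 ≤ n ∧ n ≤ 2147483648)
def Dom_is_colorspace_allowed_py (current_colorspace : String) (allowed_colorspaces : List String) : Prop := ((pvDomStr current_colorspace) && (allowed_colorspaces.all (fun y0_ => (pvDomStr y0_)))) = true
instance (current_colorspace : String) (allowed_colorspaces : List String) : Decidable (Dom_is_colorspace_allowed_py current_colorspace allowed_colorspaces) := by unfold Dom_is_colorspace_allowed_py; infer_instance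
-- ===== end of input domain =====

-- B replaces A's four sequential phases (exact scan, verbose scan, one rescan of allowed
-- per pattern group, key-term rescan) by a flat (pattern, tag) inverted index: current's
-- tag set is computed once and ONE recursive pass over allowed checks exact match,
-- short-code substring, or tag-set intersection; the key-term phase is dropped as
-- redundant (objective: simpler decomposition).

-- ===== PORT A =====
def pvNormalize (cs : String) : String :=
  PySem.Str.replace (PySem.Str.replace (PySem.Str.replace (PySem.Str.lower cs) " " "") "-" "") "_" ""

def pvPatterns : List (String × List String) :=
  [("acescg", ["acescg", "aces", "acesCg", "aces-acescg", "acesapplied", "acescglin"]),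
   ("aces2065", ["aces2065", "aces20651", "aces-2065-1"]),
   ("linear", ["linear", "scenelinear", "scene_linear", "scenereferred", "lin"]),
   ("srgb", ["srgb", "sRGB", "inputsrgb", "input-srgb", "outputsrgb", "output-srgb"]),
   ("rec709", ["rec709", "rec.709", "inputrec709", "input-rec709", "outputrec709", "output-rec709", "r709"]),
   ("log", ["log", "logc", "alog", "arri", "log3g10"]),
   ("p3", ["p3", "p3d65", "displayp3", "dci-p3"]),
   ("rec2020", ["rec2020", "rec.2020", "bt2020", "bt.2020"]),
   ("sgamut", ["sgamut", "sgamut3", "sgamut3cine", "slog3"])]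

def pvVerboseToShort : PySem.Dict String String :=
  PySem.Dict.ofList
  [("aces - acescg", "acescglin"),
   ("acescg", "acescglin"),
   ("scene_linear (aces - acescg)", "acescglin"),
   ("compositing_linear (aces - acescg)", "acescglin"),
   ("rendering (aces - acescg)", "acescglin"),
   ("utility - linear - acescg", "acescglin"),
   ("aces - aces2065-1", "aces2065"),
   ("aces2065-1", "aces2065"),
   ("input - arri - v3 logc (ei800) - alexa", "logc"),
   ("input - red - log3g10 - redwidegamutrgb", "log3g10"),
   ("input - sony - slog3 - sgamut3.cine", "slog3"),
   ("input - srgb", "srgb"),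
   ("input - rec.709", "rec709"),
   ("output - srgb", "srgb"),
   ("output - rec.709", "rec709"),
   ("output - rec.2020", "rec2020"),
   ("output - p3-dci", "p3"),
   ("utility - linear - srgb", "linear"),
   ("utility - raw", "raw"),
   ("utility - log", "log")]

def pvKeyTerms : List String :=
  ["acescg", "aces2065", "linear", "srgb", "rec709", "log", "p3", "rec2020", "sgamut"]

-- literal transliteration of Source A: exact match, then the verbose-name phase scanning
-- allowed, then one scan of allowed per matching pattern group, then the key-term phase
def is_colorspace_allowed_py (current_colorspace : String) (allowed_colorspaces : List String) : Bool :=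
  if allowed_colorspaces.contains current_colorspace then true
  else
    let current_norm := pvNormalize current_colorspace
    let phaseVerbose :=
      match PySem.Dict.get? pvVerboseToShort (PySem.Str.lower current_colorspace) with
      | some short_code =>
          allowed_colorspaces.any (fun allowed =>
            let allowed_norm := pvNormalize allowed
            short_code == allowed_norm || PySem.Str.isIn short_code allowed_norm)
      | none => false
    let phasePatterns :=
      pvPatterns.any (fun gp =>
        gp.2.any (fun pattern => PySem.Str.isIn pattern current_norm) &&
        allowed_colorspaces.any (fun allowed =>
          gp.2.any (fun pattern => PySem.Str.isIn pattern (pvNormalize allowed))))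
    let current_terms := pvKeyTerms.filter (fun term => PySem.Str.isIn term current_norm)
    let phaseTerms :=
      !current_terms.isEmpty &&
      allowed_colorspaces.any (fun allowed =>
        let allowed_terms := pvKeyTerms.filter (fun term => PySem.Str.isIn term (pvNormalize allowed))
        current_terms.any (fun term => allowed_terms.contains term))
    phaseVerbose || phasePatterns || phaseTerms

-- ===== PORT B =====
-- flat inverted index of Source B: (pattern, tag) pairs, tags = the group names
def pvPairs : List (String × String) :=
  [("acescg", "acescg"), ("aces", "acescg"), ("acesCg", "acescg"),
   ("aces-acescg", "acescg"), ("acesapplied", "acescg"), ("acescglin", "acescg"),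
   ("aces2065", "aces2065"), ("aces20651", "aces2065"), ("aces-2065-1", "aces2065"),
   ("linear", "linear"), ("scenelinear", "linear"), ("scene_linear", "linear"),
   ("scenereferred", "linear"), ("lin", "linear"),
   ("srgb", "srgb"), ("sRGB", "srgb"), ("inputsrgb", "srgb"),
   ("input-srgb", "srgb"), ("outputsrgb", "srgb"), ("output-srgb", "srgb"),
   ("rec709", "rec709"), ("rec.709", "rec709"), ("inputrec709", "rec709"),
   ("input-rec709", "rec709"), ("outputrec709", "rec709"),
   ("output-rec709", "rec709"), ("r709", "rec709"),
   ("log", "log"), ("logc", "log"), ("alog", "log"), ("arri", "log"), ("log3g10", "log"),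
   ("p3", "p3"), ("p3d65", "p3"), ("displayp3", "p3"), ("dci-p3", "p3"),
   ("rec2020", "rec2020"), ("rec.2020", "rec2020"), ("bt2020", "rec2020"), ("bt.2020", "rec2020"),
   ("sgamut", "sgamut"), ("sgamut3", "sgamut"), ("sgamut3cine", "sgamut"), ("slog3", "sgamut")]

-- Source B's _tags: the set of tags whose pattern occurs in the normalized string
def pvTagsOf (norm : String) : PySem.Set String :=
  PySem.Set.ofList ((pvPairs.filter (fun pr => PySem.Str.isIn pr.1 norm)).map Prod.snd)

-- Source B's single for-loop over allowed with early returns, as structural recursion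
def pvScan (cur : String) (sc? : Option String) (curTags : PySem.Set String) :
    List String → Bool
  | [] => false
  | a :: rest =>
      if a == cur then true
      else
        let an := pvNormalize a
        if (match sc? with | some sc => PySem.Str.isIn sc an | none => false) then true
        else if !(PySem.Set.inter curTags (pvTagsOf an)).isEmpty then true
        else pvScan cur sc? curTags rest

-- literal transliteration of Source B
def is_colorspace_allowed_py_alt (current_colorspace : String) (allowed_colorspaces : List String) : Bool :=
  let cur_norm := pvNormalize current_colorspace
  let cur_tags := pvTagsOf cur_norm
  let short_code := PySem.Dict.get? pvVerboseToShort (PySem.Str.lower current_colorspace)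
  pvScan current_colorspace short_code cur_tags allowed_colorspaces

-- ===== PRECONDITION & SPEC =====
def Spec_is_colorspace_allowed_py (current_colorspace : String) (allowed_colorspaces : List String) (out : Bool) : Prop := out = is_colorspace_allowed_py_alt current_colorspace allowed_colorspaces
instance (current_colorspace : String) (allowed_colorspaces : List String) (out : Bool) : Decidable (Spec_is_colorspace_allowed_py current_colorspace allowed_colorspaces out) := by unfold Spec_is_colorspace_allowed_py; infer_instance

-- ===== CLAIM (what is proved, stated in full; the proofs are below) =====
def Claim_equal_is_colorspace_allowed_py : Prop := ∀ (current_colorspace : String) (allowed_colorspaces : List String), Dom_is_colorspace_allowed_py current_colorspace allowed_colorspaces → Spec_is_colorspace_allowed_py current_colorspace allowed_colorspaces (is_colorspace_allowed_py current_colorspace allowed_colorspaces)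

-- ===== LEMMAS AND PROOFS =====

-- every string is a substring of itself
theorem pvIsIn_self (s : String) : PySem.Str.isIn s s = true := by
  simp [PySem.Chars.isIn_iff_infix]

-- the flat pair list is exactly A's grouped table, flattened
theorem pvPairs_eq_flat :
    pvPairs = pvPatterns.flatMap (fun gp => gp.2.map (fun p => (p, gp.1))) := by decide

-- the pattern-group names in the concrete table are distinct
theorem pvPatterns_names_nodup : (pvPatterns.map Prod.fst).Nodup := by decide

-- every key term names a group whose pattern list contains the term itself
theorem pvKeyTerms_self_pair : ∀ t ∈ pvKeyTerms, (t, t) ∈ pvPairs := by decide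

-- membership in Source B's tag set, phrased through A's grouped table
theorem pvMem_tagsOf (t : String) (norm : String) :
    t ∈ pvTagsOf norm ↔
      ∃ gp ∈ pvPatterns, gp.1 = t ∧ ∃ p ∈ gp.2, PySem.Str.isIn p norm = true := by
  unfold pvTagsOf
  rw [pvPairs_eq_flat]
  simp only [PySem.Set.mem_ofList, List.mem_map, List.mem_filter, List.mem_flatMap]
  constructor
  · rintro ⟨pr, ⟨⟨gp, hgp, p, hp, rfl⟩, hin⟩, rfl⟩
    exact ⟨gp, hgp, rfl, p, hp, hin⟩
  · rintro ⟨gp, hgp, rfl, p, hp, hin⟩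
    exact ⟨(p, gp.1), ⟨⟨gp, hgp, p, hp, rfl⟩, hin⟩, rfl⟩

-- the recursive scan returns true iff some element of the list passes one of the checks
theorem pvScan_eq_any (cur : String) (sc? : Option String) (curTags : PySem.Set String)
    (l : List String) :
    pvScan cur sc? curTags l =
      l.any (fun a =>
        (a == cur) ||
        (match sc? with | some sc => PySem.Str.isIn sc (pvNormalize a) | none => false) ||
        !(PySem.Set.inter curTags (pvTagsOf (pvNormalize a))).isEmpty) := by
  induction l with
  | nil => rfl
  | cons a rest ih =>
      simp only [pvScan, List.any_cons, ih]
      split_ifs <;> simp_all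

-- tag-set intersection nonempty ⟺ some pattern group matches both strings
theorem pvInter_iff (cn an : String) :
    (PySem.Set.inter (pvTagsOf cn) (pvTagsOf an)) ≠ [] ↔
      ∃ gp ∈ pvPatterns,
        (∃ p ∈ gp.2, PySem.Str.isIn p cn = true) ∧
        (∃ p ∈ gp.2, PySem.Str.isIn p an = true) := by
  constructor
  · intro hne
    obtain ⟨t, htm⟩ := List.exists_mem_of_ne_nil _ hne
    rw [PySem.Set.mem_inter, pvMem_tagsOf, pvMem_tagsOf] at htm
    obtain ⟨⟨gp, hgp, hname, p, hp, hpc⟩, ⟨gp', hgp', hname', p', hp', hpa⟩⟩ := htm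
    obtain rfl : gp' = gp :=
      List.inj_on_of_nodup_map pvPatterns_names_nodup hgp' hgp (hname'.trans hname.symm)
    exact ⟨_, hgp, ⟨p, hp, hpc⟩, ⟨p', hp', hpa⟩⟩
  · rintro ⟨gp, hgp, ⟨p, hp, hpc⟩, ⟨p', hp', hpa⟩⟩
    refine List.ne_nil_of_mem (a := gp.1) ?_
    rw [PySem.Set.mem_inter, pvMem_tagsOf, pvMem_tagsOf]
    exact ⟨⟨gp, hgp, rfl, p, hp, hpc⟩, ⟨gp, hgp, rfl, p', hp', hpa⟩⟩

-- a key term shared by both strings yields a shared tag (the pair (t, t))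
theorem pvTerm_to_inter (cn an t : String) (htk : t ∈ pvKeyTerms)
    (hcn : PySem.Str.isIn t cn = true) (han : PySem.Str.isIn t an = true) :
    (PySem.Set.inter (pvTagsOf cn) (pvTagsOf an)) ≠ [] := by
  have hpair := pvKeyTerms_self_pair t htk
  rw [pvPairs_eq_flat] at hpair
  simp only [List.mem_flatMap, List.mem_map] at hpair
  obtain ⟨gp, hgp, p, hp, hpe⟩ := hpair
  obtain ⟨rfl, -⟩ : p = t ∧ gp.1 = t :=
    ⟨congrArg Prod.fst hpe, congrArg Prod.snd hpe⟩
  exact (pvInter_iff cn an).mpr ⟨gp, hgp, ⟨p, hp, hcn⟩, ⟨p, hp, han⟩⟩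

-- ===== VERDICT (by name: the statement is the Claim_ definition above) =====
theorem is_colorspace_allowed_py_spec : Claim_equal_is_colorspace_allowed_py := by
  intro cur allowed _
  unfold Spec_is_colorspace_allowed_py is_colorspace_allowed_py is_colorspace_allowed_py_alt
  rw [pvScan_eq_any, Bool.eq_iff_iff]
  cases hc : allowed.contains cur with
  | true =>
    simp only [if_true, true_iff, List.any_eq_true]
    have hmem : cur ∈ allowed := by simpa using hc
    exact ⟨cur, hmem, by simp⟩
  | false =>
    have hnm : cur ∉ allowed := by simpa using hc
    rcases hsc : PySem.Dict.get? pvVerboseToShort (PySem.Str.lower cur) with _ | sc <;>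
      simp only [Bool.false_eq_true, if_false, List.any_eq_true, Bool.or_eq_true,
        Bool.and_eq_true, Bool.not_eq_true', List.isEmpty_eq_false_iff, beq_iff_eq,
        List.mem_filter, List.elem_iff, pvInter_iff, Bool.false_or, Bool.or_false]
    · -- no verbose short code
      constructor
      · rintro (⟨gp, hgp, hcur, a, ha, hpa⟩ | ⟨-, a, ha, t, ⟨htk, htc⟩, ht2, hta⟩)
        · exact ⟨a, ha, Or.inr ⟨gp, hgp, hcur, hpa⟩⟩
        · exact ⟨a, ha, Or.inr ((pvInter_iff _ _).mp
            (pvTerm_to_inter _ _ t htk htc hta))⟩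
      · rintro ⟨a, ha, heq | hg⟩
        · exact absurd (heq ▸ ha) hnm
        · obtain ⟨gp, hgp, hcur, hpa⟩ := hg
          exact Or.inl ⟨gp, hgp, hcur, a, ha, hpa⟩
    · -- verbose short code present
      constructor
      · rintro ((⟨a, ha, heq | hin⟩ | ⟨gp, hgp, hcur, a, ha, hpa⟩) |
            ⟨-, a, ha, t, ⟨htk, htc⟩, ht2, hta⟩)
        · exact ⟨a, ha, Or.inl (Or.inr (heq ▸ pvIsIn_self _))⟩
        · exact ⟨a, ha, Or.inl (Or.inr hin)⟩
        · exact ⟨a, ha, Or.inr ⟨gp, hgp, hcur, hpa⟩⟩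
        · exact ⟨a, ha, Or.inr ((pvInter_iff _ _).mp
            (pvTerm_to_inter _ _ t htk htc hta))⟩  -- term phase via shared tag
      · rintro ⟨a, ha, (heq | hin) | hg⟩
        · exact absurd (heq ▸ ha) hnm
        · exact Or.inl (Or.inl ⟨a, ha, Or.inr hin⟩)
        · obtain ⟨gp, hgp, hcur, hpa⟩ := hg
          exact Or.inl (Or.inr ⟨gp, hgp, hcur, a, ha, hpa⟩)
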